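-- pv_equiv track=rewrite | github.com/roytravel/problem-solving | 00. BOJ-Solutions/단계별/브루트포스/2231-분해합.py | solution
-- ===== SOURCE A (Python) =====
-- def solution(N):
--     _sum = 0
--     _lists = []
--     for i in range(N):
--         b = list(map(int, list(str(i))))
--         _sum = sum(b)
--         if _sum + i == N:
--             _lists.append(i)
--         else:
--             _sum = 0
--     return _lists
-- ===== SOURCE B (Python) =====
-- def solution(N):
--     # A generator i of N satisfies N - i = digitsum(i) <= 9 * len(str(N)),
--     # so only a small window below N needs checking.
--     lo = max(0, N - 9 * len(str(N)))
--     return [i for i in range(lo, N) if i + sum(map(int, str(i))) == N]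
-- ===== Notes on version B (the rewrite author's own statement) =====
-- stated objective: faster
-- what changed: B replaces A's brute-force scan of all i in range(N) by scanning only the window [max(0, N-9*len(str(N))), N), since any generator i satisfies N-i = digitsum(i) <= 9*digits(N).
import Mathlib
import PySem

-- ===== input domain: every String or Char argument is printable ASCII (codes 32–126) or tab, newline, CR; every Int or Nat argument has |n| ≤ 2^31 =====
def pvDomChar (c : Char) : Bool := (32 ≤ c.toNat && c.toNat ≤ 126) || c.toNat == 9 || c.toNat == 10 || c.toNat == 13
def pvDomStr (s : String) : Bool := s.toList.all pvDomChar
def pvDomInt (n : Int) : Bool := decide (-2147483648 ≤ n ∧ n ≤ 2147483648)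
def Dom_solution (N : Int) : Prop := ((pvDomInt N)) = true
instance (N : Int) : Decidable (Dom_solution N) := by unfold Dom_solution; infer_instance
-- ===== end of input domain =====

-- B scans only the window [max(0, N-9*len(str(N))), N) instead of all of range(N):
-- any i with i+digitsum(i)==N satisfies N-i = digitsum(i) ≤ 9*len(str(N)).  Objective: faster.

-- ===== PORT A =====
-- int(c) is applied to single digit chars of str(i) with i ≥ 0, so ofChars? is never none
-- and the .getD 0 default is never used (exact on the inputs reached).
def solution (N : Int) : List Int :=
  ((PySem.List.pyRange 0 N 1).foldl
    (fun (st : Int × List Int) i =>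
      let b := (PySem.Int.toChars i).map (fun c => (PySem.Int.ofChars? [c]).getD 0)
      let s := b.sum
      if s + i = N then (s, st.2 ++ [i]) else (0, st.2))
    (0, [])).2

-- ===== PORT B =====
-- len(str(N)) is ported as (toChars N).length (toStr is toChars packed into a String).
def solution_alt (N : Int) : List Int :=
  let lo := max 0 (N - 9 * ((PySem.Int.toChars N).length : Int))
  (PySem.List.pyRange lo N 1).filter
    (fun i => i + ((PySem.Int.toChars i).map (fun c => (PySem.Int.ofChars? [c]).getD 0)).sum == N)

-- ===== PRECONDITION & SPEC =====
def Spec_solution (N : Int) (out : List Int) : Prop := out = solution_alt N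
instance (N : Int) (out : List Int) : Decidable (Spec_solution N out) := by unfold Spec_solution; infer_instance

-- ===== CLAIM (what is proved, stated in full; the proofs are below) =====
def Claim_equal_solution : Prop := ∀ (N : Int), Dom_solution N → Spec_solution N (solution N)

-- ===== LEMMAS AND PROOFS =====

-- proof-side decimal digit sum and digit count of a Nat
def pvSd (n : Nat) : Nat := if n < 10 then n else n % 10 + pvSd (n / 10)
  decreasing_by omega
def pvLen (n : Nat) : Nat := if n < 10 then 1 else pvLen (n / 10) + 1
  decreasing_by omega

lemma pvCharVal_digitChar (d : Nat) (hd : d < 10) :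
    ((PySem.Int.ofChars? [Nat.digitChar d]).getD 0) = (d : Int) := by
  interval_cases d <;> rfl

lemma pvCore_props (f : Nat) : ∀ (n : Nat) (l : List Char), 0 < f → n < 10 ^ f →
    ((Nat.toDigitsCore 10 f n l).map (fun c => (PySem.Int.ofChars? [c]).getD 0)).sum
        = (pvSd n : Int) + ((l.map (fun c => (PySem.Int.ofChars? [c]).getD 0)).sum) ∧
    (Nat.toDigitsCore 10 f n l).length = pvLen n + l.length := by
  induction f with
  | zero => intro n l hf; omega
  | succ f ih =>
    intro n l _ hn
    rw [Nat.toDigitsCore]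
    by_cases h : n / 10 = 0
    · have hn10 : n < 10 := by omega
      rw [if_pos h]
      have hsd : pvSd n = n := by rw [pvSd, if_pos hn10]
      have hln : pvLen n = 1 := by rw [pvLen, if_pos hn10]
      constructor
      · simp only [List.map_cons, List.sum_cons, Nat.mod_eq_of_lt hn10,
          pvCharVal_digitChar n hn10, hsd]
      · simp only [List.length_cons, hln]
        omega
    · have hge : 10 ≤ n := by omega
      have hfpos : 0 < f := by
        by_contra hf0
        have : f = 0 := by omega
        subst this; simp at hn; omega
      have hdiv : n / 10 < 10 ^ f := by
        have : n < 10 * 10 ^ f := by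
          calc n < 10 ^ (f + 1) := hn
          _ = 10 * 10 ^ f := by ring
        omega
      rw [if_neg h]
      obtain ⟨hs, hl⟩ := ih (n / 10) (Nat.digitChar (n % 10) :: l) hfpos hdiv
      have hsd : pvSd n = n % 10 + pvSd (n / 10) := by rw [pvSd, if_neg (by omega)]
      have hln : pvLen n = pvLen (n / 10) + 1 := by rw [pvLen, if_neg (by omega)]
      constructor
      · rw [hs]
        simp only [List.map_cons, List.sum_cons, pvCharVal_digitChar (n % 10) (by omega), hsd]
        push_cast
        ring
      · rw [hl]
        simp only [List.length_cons, hln]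
        omega

lemma pvToDigits_sum (n : Nat) :
    ((Nat.toDigits 10 n).map (fun c => (PySem.Int.ofChars? [c]).getD 0)).sum = (pvSd n : Int) := by
  have h := (pvCore_props (n + 1) n [] (by omega)
    (lt_of_lt_of_le (Nat.lt_pow_self (by omega)) (Nat.pow_le_pow_right (by omega) (by omega)))).1
  simpa [Nat.toDigits] using h

lemma pvToDigits_len (n : Nat) :
    (Nat.toDigits 10 n).length = pvLen n := by
  have h := (pvCore_props (n + 1) n [] (by omega)
    (lt_of_lt_of_le (Nat.lt_pow_self (by omega)) (Nat.pow_le_pow_right (by omega) (by omega)))).2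
  simpa [Nat.toDigits] using h

lemma pvSd_le (n : Nat) : pvSd n ≤ 9 * pvLen n := by
  induction n using Nat.strong_induction_on with
  | _ n ih =>
    rw [pvSd, pvLen]
    by_cases h : n < 10
    · simp [h]; omega
    · rw [if_neg h, if_neg h]
      have := ih (n / 10) (by omega)
      omega

lemma pvLen_mono (m n : Nat) (h : m ≤ n) : pvLen m ≤ pvLen n := by
  induction n using Nat.strong_induction_on generalizing m with
  | _ n ih =>
    have h1 : 1 ≤ pvLen n := by
      by_cases hn : n < 10
      · rw [pvLen, if_pos hn]
      · rw [pvLen, if_neg hn]; omega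
    by_cases hm : m < 10
    · rw [pvLen, if_pos hm]; exact h1
    · have hn : ¬ n < 10 := by omega
      rw [pvLen, if_neg hm]
      conv_rhs => rw [pvLen, if_neg hn]
      have := ih (n / 10) (by omega) (m / 10) (by omega)
      omega

lemma pvFoldA (N : Int) (l : List Int) (s0 : Int) (acc : List Int) :
    ((l.foldl
      (fun (st : Int × List Int) i =>
        let b := (PySem.Int.toChars i).map (fun c => (PySem.Int.ofChars? [c]).getD 0)
        let s := b.sum
        if s + i = N then (s, st.2 ++ [i]) else (0, st.2))
      (s0, acc))).2
    = acc ++ l.filter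
        (fun i => i + ((PySem.Int.toChars i).map (fun c => (PySem.Int.ofChars? [c]).getD 0)).sum == N) := by
  induction l generalizing s0 acc with
  | nil => simp
  | cons i t ih =>
    simp only [List.foldl_cons, List.filter_cons]
    by_cases h : ((PySem.Int.toChars i).map (fun c => (PySem.Int.ofChars? [c]).getD 0)).sum + i = N
    · rw [if_pos h, ih]
      have hb : (i + ((PySem.Int.toChars i).map (fun c => (PySem.Int.ofChars? [c]).getD 0)).sum == N) = true := by
        simp; omega
      rw [hb]; simp
    · rw [if_neg h, ih]
      have hb : (i + ((PySem.Int.toChars i).map (fun c => (PySem.Int.ofChars? [c]).getD 0)).sum == N) = false := by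
        simp; omega
      rw [hb]; simp

lemma pvDs_nonneg_eq (i : Int) (hi : 0 ≤ i) :
    ((PySem.Int.toChars i).map (fun c => (PySem.Int.ofChars? [c]).getD 0)).sum = (pvSd i.toNat : Int) := by
  rw [PySem.Int.toChars, if_neg (by omega), pvToDigits_sum]

-- ===== VERDICT (by name: the statement is the Claim_ definition above) =====
theorem solution_spec : Claim_equal_solution := by
  intro N _
  unfold Spec_solution solution solution_alt
  rw [pvFoldA]
  simp only [List.nil_append]
  by_cases hN : N ≤ 0
  · rw [PySem.List.pyRange_one_eq_nil hN, PySem.List.pyRange_one_eq_nil (by omega : N ≤ max 0 (N - 9 * ((PySem.Int.toChars N).length : Int)))]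
  · replace hN : 0 < N := by omega
    have hLen : (PySem.Int.toChars N).length = pvLen N.toNat := by
      rw [PySem.Int.toChars, if_neg (by omega), pvToDigits_len]
    set lo : Int := max 0 (N - 9 * ((PySem.Int.toChars N).length : Int)) with hlo
    have h0lo : 0 ≤ lo := le_max_left _ _
    have hloN : lo ≤ N := by
      rw [hlo]
      have : (0:Int) ≤ 9 * ((PySem.Int.toChars N).length : Int) := by positivity
      omega
    rw [PySem.List.pyRange_one_append 0 lo N h0lo hloN, List.filter_append]
    have hnil : (PySem.List.pyRange 0 lo 1).filter
        (fun i => i + ((PySem.Int.toChars i).map (fun c => (PySem.Int.ofChars? [c]).getD 0)).sum == N) = [] := by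
      rw [List.filter_eq_nil_iff]
      intro i hi
      rw [PySem.List.mem_pyRange_one] at hi
      obtain ⟨hi0, hilo⟩ := hi
      have hilo' : i < N - 9 * ((PySem.Int.toChars N).length : Int) := by
        rcases max_cases 0 (N - 9 * ((PySem.Int.toChars N).length : Int)) with ⟨he, _⟩ | ⟨he, _⟩ <;>
          rw [hlo] at hilo <;> omega
      rw [pvDs_nonneg_eq i hi0]
      have hsd : pvSd i.toNat ≤ 9 * pvLen N.toNat :=
        le_trans (pvSd_le i.toNat)
          (by
            have : pvLen i.toNat ≤ pvLen N.toNat := pvLen_mono _ _ (by omega)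
            omega)
      rw [hLen] at hilo'
      simp
      omega
    rw [hnil, List.nil_append]
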